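-- pv_equiv track=rewrite | github.com/pypi-data/pypi-mirror-385 | packages/py-allspice/py_allspice-3.12.0.tar.gz/py_allspice-3.12.0/allspice/utils/list_components.py | _combine_multi_part_components_for_orcad
-- ===== SOURCE A (Python) =====
-- PART_REFERENCE_ATTR_NAME = "Part Reference"
--
-- def _combine_multi_part_components_for_orcad(
--     components: list[dict[str, str]],
-- ) -> list[dict[str, str]]:
--     """
--     Combine multi-part OrCAD components into a single component.
--
--     Multi-part OrCAD components can be distinguished by the "logical_reference"
--     attribute, which ties together the different parts of the component.
--     """
--
--     combined_components = []
--     multi_part_components_by_designator = {}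
--
--     for component in components:
--         if "_logical_reference" in component:
--             designator = component["_logical_reference"]
--             multi_part_components_by_designator.setdefault(designator, []).append(component)
--         else:
--             combined_components.append(component)
--
--     for designator, multi_part_components in multi_part_components_by_designator.items():
--         combined_component = multi_part_components[0].copy()
--         combined_component[PART_REFERENCE_ATTR_NAME] = designator
--         combined_component["_reference"] = designator
--         combined_components.append(combined_component)
--
--     return combined_components
-- ===== SOURCE B (Python) =====
-- PART_REFERENCE_ATTR_NAME = "Part Reference"
--
-- def _combine_multi_part_components_for_orcad(
--     components: list[dict[str, str]],
-- ) -> list[dict[str, str]]: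
--     """Recursive decomposition: walk the list once, returning the pair
--     (plain components, combined multi-part components) built front-to-back
--     by consing onto the recursive result; no grouping dict, no second pass."""
--
--     def go(rest, seen):
--         if not rest:
--             return [], []
--         component, tail = rest[0], rest[1:]
--         designator = component.get("_logical_reference")
--         if designator is None:
--             plain, combined = go(tail, seen)
--             return [component] + plain, combined
--         if designator in seen:
--             return go(tail, seen)
--         plain, combined = go(tail, seen | {designator})
--         cc = component.copy()
--         cc[PART_REFERENCE_ATTR_NAME] = designator
--         cc["_reference"] = designator
--         return plain, [cc] + combined
--
--     plain, combined = go(components, set())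
--     return plain + combined
-- ===== Notes on version B (the rewrite author's own statement) =====
-- stated objective: alternative
-- what changed: Replaces A's dict-of-lists grouping index and its second pass over dict items with a structural recursion that walks the list once, threading a seen-set of designators and building the (plain, combined) output pair by consing onto the recursive result.
import Mathlib
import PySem

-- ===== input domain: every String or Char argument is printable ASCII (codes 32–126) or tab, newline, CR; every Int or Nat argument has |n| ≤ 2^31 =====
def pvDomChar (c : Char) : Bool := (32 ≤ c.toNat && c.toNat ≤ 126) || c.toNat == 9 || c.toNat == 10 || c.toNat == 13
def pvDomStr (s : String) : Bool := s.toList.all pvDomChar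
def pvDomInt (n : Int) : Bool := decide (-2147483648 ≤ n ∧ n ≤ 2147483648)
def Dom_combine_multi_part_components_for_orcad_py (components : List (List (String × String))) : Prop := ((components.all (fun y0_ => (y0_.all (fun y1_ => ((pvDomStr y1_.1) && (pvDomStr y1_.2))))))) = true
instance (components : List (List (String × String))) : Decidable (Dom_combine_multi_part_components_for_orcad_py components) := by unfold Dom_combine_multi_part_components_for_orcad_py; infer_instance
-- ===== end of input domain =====

-- B replaces A's dict-of-lists grouping index and second pass by a structural recursion that
-- walks the list once with a seen-set, building the (plain, combined) pair by consing onto the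
-- recursive result (objective: alternative decomposition, same behaviour).


-- shared primitive: 'c["Part Reference"] = d; c["_reference"] = d' on a copy of dict c
-- (both Pythons perform exactly these two assignments)
def pvFinish (d : String) (c : List (String × String)) : List (String × String) :=
  (((PySem.Dict.mk c).insert "Part Reference" d).insert "_reference" d).items

-- ===== PORT A =====
-- first loop of A: 'setdefault(des, []).append(component)' is the dict update
-- mp[des] = mp.get(des, []) + [component]; else-branch appends to combined_components
def pvStepA (st : List (List (String × String)) × PySem.Dict String (List (List (String × String))))
    (component : List (String × String)) :
    List (List (String × String)) × PySem.Dict String (List (List (String × String))) :=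
  match (PySem.Dict.mk component).get? "_logical_reference" with
  | some designator => (st.1, st.2.insert designator (st.2.getD designator [] ++ [component]))
  | none => (st.1 ++ [component], st.2)

def combine_multi_part_components_for_orcad_py (components : List (List (String × String))) : List (List (String × String)) :=
  let st := components.foldl pvStepA ([], PySem.Dict.empty)
  -- second loop of A over the grouping dict's items; 'multi_part_components[0]' cannot fail
  -- because every stored list is nonempty, so '.headD []' is its total transliteration
  st.2.items.foldl (fun acc p => acc ++ [pvFinish p.1 (p.2.headD [])]) st.1

-- ===== PORT B =====
-- Source B's inner 'go': structural recursion on the component list, threading the seen-set,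
-- returning the (plain, combined) pair built by consing onto the recursive result
def pvGo (rest : List (List (String × String))) (seen : PySem.Set String) :
    List (List (String × String)) × List (List (String × String)) :=
  match rest with
  | [] => ([], [])
  | component :: tail =>
    match (PySem.Dict.mk component).get? "_logical_reference" with
    | none =>
      let pm := pvGo tail seen
      (component :: pm.1, pm.2)
    | some designator =>
      if PySem.Set.contains seen designator then pvGo tail seen
      else
        let pm := pvGo tail (PySem.Set.union seen [designator])
        (pm.1, pvFinish designator component :: pm.2)

def combine_multi_part_components_for_orcad_py_alt (components : List (List (String × String))) : List (List (String × String)) :=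
  let pm := pvGo components PySem.Set.empty
  pm.1 ++ pm.2

-- ===== PRECONDITION & SPEC =====
def Spec_combine_multi_part_components_for_orcad_py (components : List (List (String × String))) (out : List (List (String × String))) : Prop := out = combine_multi_part_components_for_orcad_py_alt components
instance (components : List (List (String × String))) (out : List (List (String × String))) : Decidable (Spec_combine_multi_part_components_for_orcad_py components out) := by unfold Spec_combine_multi_part_components_for_orcad_py; infer_instance

-- ===== CLAIM (what is proved, stated in full; the proofs are below) =====
def Claim_equal_combine_multi_part_components_for_orcad_py : Prop := ∀ (components : List (List (String × String))), Dom_combine_multi_part_components_for_orcad_py components → Spec_combine_multi_part_components_for_orcad_py components (combine_multi_part_components_for_orcad_py components)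

-- ===== LEMMAS AND PROOFS =====

def pvF (p : String × List (List (String × String))) : List (String × String) :=
  pvFinish p.1 (p.2.headD [])

lemma headD_append_singleton {α : Type} (l : List α) (c : α) (d : α) (h : l ≠ []) :
    (l ++ [c]).headD d = l.headD d := by
  cases l with
  | nil => exact absurd rfl h
  | cons a t => rfl

-- the recursion of B, started from the keys of an arbitrary grouping dict mp, computes
-- exactly what the remainder of A's two passes adds beyond (main, mp)
lemma pv_loop_inv (cs : List (List (String × String)))
    (mp : PySem.Dict String (List (List (String × String))))
    (main : List (List (String × String)))
    (hnd : mp.keys.Nodup) (hne : ∀ p ∈ mp.items, p.2 ≠ []) :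
    main ++ (pvGo cs mp.keys).1 = (cs.foldl pvStepA (main, mp)).1 ∧
    mp.items.map pvF ++ (pvGo cs mp.keys).2 = (cs.foldl pvStepA (main, mp)).2.items.map pvF := by
  induction cs generalizing mp main with
  | nil => simp [pvGo]
  | cons c cs ih =>
    simp only [List.foldl_cons]
    cases hg : (PySem.Dict.mk c).get? "_logical_reference" with
    | none =>
      have hA : pvStepA (main, mp) c = (main ++ [c], mp) := by
        simp [pvStepA, hg]
      have hB : pvGo (c :: cs) mp.keys = (c :: (pvGo cs mp.keys).1, (pvGo cs mp.keys).2) := by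
        simp [pvGo, hg]
      rw [hA, hB]
      obtain ⟨h1, h2⟩ := ih mp (main ++ [c]) hnd hne
      exact ⟨by simpa using h1, h2⟩
    | some d =>
      by_cases hc : mp.contains d = true
      · -- designator already grouped: A grows the stored list, B skips
        have hmem : d ∈ mp.keys := (PySem.Dict.contains_iff_mem_keys mp d).1 hc
        have hA : pvStepA (main, mp) c
            = (main, mp.insert d (mp.getD d [] ++ [c])) := by
          simp [pvStepA, hg]
        have hB : pvGo (c :: cs) mp.keys = pvGo cs mp.keys := by
          simp [pvGo, hg, hmem]
        rw [hA, hB]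
        have hkeys : (mp.insert d (mp.getD d [] ++ [c])).keys = mp.keys :=
          PySem.Dict.keys_insert_of_contains mp _ hc
        have hitems : (mp.insert d (mp.getD d [] ++ [c])).items
            = mp.items.map (fun p => if p.1 == d then (d, mp.getD d [] ++ [c]) else p) :=
          PySem.Dict.items_insert_of_contains mp _ hc
        have hmapF : (mp.insert d (mp.getD d [] ++ [c])).items.map pvF
            = mp.items.map pvF := by
          rw [hitems, List.map_map]
          apply List.map_congr_left
          intro p hp
          obtain ⟨p1, p2⟩ := p
          by_cases hpd : p1 = d
          · subst hpd
            have hgd : mp.getD p1 [] = p2 := PySem.Dict.getD_of_mem_items mp hp hnd []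
            have hpne : p2 ≠ [] := hne _ hp
            simp only [Function.comp_apply, beq_self_eq_true, if_true, pvF]
            rw [hgd, headD_append_singleton _ _ _ hpne]
          · simp [hpd]
        have hne' : ∀ p ∈ (mp.insert d (mp.getD d [] ++ [c])).items, p.2 ≠ [] := by
          intro p hp
          rw [hitems] at hp
          obtain ⟨q, hq, hqp⟩ := List.mem_map.1 hp
          by_cases hqd : (q.1 == d) = true
          · rw [if_pos hqd] at hqp
            rw [← hqp]; simp
          · rw [if_neg (by simp_all)] at hqp
            rw [← hqp]; exact hne q hq
        have hnd' : (mp.insert d (mp.getD d [] ++ [c])).keys.Nodup := by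
          rw [hkeys]; exact hnd
        obtain ⟨h1, h2⟩ := ih (mp.insert d (mp.getD d [] ++ [c])) main hnd' hne'
        rw [hkeys, hmapF] at *
        exact ⟨h1, h2⟩
      · -- fresh designator: A appends a new group, B emits the combined component now
        have hc' : mp.contains d = false := by simpa using hc
        have hnmem : d ∉ mp.keys := fun h => hc ((PySem.Dict.contains_iff_mem_keys mp d).2 h)
        have hgd : mp.getD d [] = [] := PySem.Dict.getD_of_not_contains mp [] hc'
        have hA : pvStepA (main, mp) c = (main, mp.insert d [c]) := by
          simp [pvStepA, hg, hgd]
        have hkeys : (mp.insert d [c]).keys = mp.keys ++ [d] :=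
          PySem.Dict.keys_insert_of_not_contains mp _ hc'
        have hunion : PySem.Set.union mp.keys [d] = mp.keys ++ [d] := by
          simp [PySem.Set.union, PySem.Set.update, PySem.Set.add, hnmem]
        have hB : pvGo (c :: cs) mp.keys
            = ((pvGo cs (mp.keys ++ [d])).1,
               pvFinish d c :: (pvGo cs (mp.keys ++ [d])).2) := by
          simp [pvGo, hg, hnmem, hunion]
        rw [hA, hB]
        have hitems : (mp.insert d [c]).items = mp.items ++ [(d, [c])] :=
          PySem.Dict.items_insert_of_not_contains mp _ hc'
        have hmapF : (mp.insert d [c]).items.map pvF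
            = mp.items.map pvF ++ [pvFinish d c] := by
          rw [hitems]; simp [pvF]
        have hnd' : (mp.insert d [c]).keys.Nodup := by
          rw [hkeys]
          simp [List.nodup_append, hnd]
          intro a ha h
          exact hnmem (h ▸ ha)
        have hne' : ∀ p ∈ (mp.insert d [c]).items, p.2 ≠ [] := by
          intro p hp
          rw [hitems] at hp
          rcases List.mem_append.1 hp with h | h
          · exact hne p h
          · simp at h; rw [h]; simp
        obtain ⟨h1, h2⟩ := ih (mp.insert d [c]) main hnd' hne'
        rw [hkeys] at h1 h2
        rw [hmapF] at h2
        exact ⟨h1, by simpa using h2⟩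

-- ===== VERDICT (by name: the statement is the Claim_ definition above) =====
theorem combine_multi_part_components_for_orcad_py_spec : Claim_equal_combine_multi_part_components_for_orcad_py := by
  intro components _
  unfold Spec_combine_multi_part_components_for_orcad_py
  unfold combine_multi_part_components_for_orcad_py combine_multi_part_components_for_orcad_py_alt
  obtain ⟨h1, h2⟩ := pv_loop_inv components PySem.Dict.empty []
    (by simp [PySem.Dict.keys, PySem.Dict.empty])
    (by intro p hp; simp [PySem.Dict.empty] at hp)
  have hkeys0 : (PySem.Dict.empty : PySem.Dict String (List (List (String × String)))).keys = PySem.Set.empty := by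
    simp [PySem.Dict.keys, PySem.Dict.empty, PySem.Set.empty]
  have hitems0 : (PySem.Dict.empty : PySem.Dict String (List (List (String × String)))).items.map pvF = [] := by
    simp [PySem.Dict.empty]
  rw [hkeys0] at h1 h2
  rw [hitems0] at h2
  rw [PySem.List.foldl_append_singleton_eq_map]
  show (components.foldl pvStepA ([], PySem.Dict.empty)).1 ++
      ((components.foldl pvStepA ([], PySem.Dict.empty)).2.items.map fun p => pvFinish p.1 (p.2.headD [])) = _
  simp only [show (fun p : String × List (List (String × String)) => pvFinish p.1 (p.2.headD [])) = pvF from rfl]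
  rw [← h1, ← h2]
  simp
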